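-- pv_equiv track=rewrite | github.com/Dimi20cen/HQ | controller/controller_main.py | _summarize_health
-- ===== SOURCE A (Python) =====
-- def _summarize_health(snapshot: dict) -> str:
--     configured = [
--         entry["status"]
--         for entry in snapshot.values()
--         if isinstance(entry, dict) and entry.get("status") != "unconfigured"
--     ]
--     if not configured:
--         return "unconfigured"
--     if all(status == "healthy" for status in configured):
--         return "healthy"
--     if all(status == "unknown" for status in configured):
--         return "unknown"
--     if any(status == "healthy" for status in configured):
--         return "degraded"
--     if any(status == "unknown" for status in configured):
--         return "unknown"
--     return "down"
-- ===== SOURCE B (Python) =====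
-- def _summarize_health(snapshot: dict) -> str:
--     has_healthy = has_unknown = has_other = False
--     for entry in snapshot.values():
--         if isinstance(entry, dict) and entry.get("status") != "unconfigured":
--             status = entry["status"]
--             if status == "healthy":
--                 has_healthy = True
--             elif status == "unknown":
--                 has_unknown = True
--             else:
--                 has_other = True
--     if not (has_healthy or has_unknown or has_other):
--         return "unconfigured"
--     if has_healthy:
--         return "degraded" if (has_unknown or has_other) else "healthy"
--     if has_other:
--         return "unknown" if has_unknown else "down"
--     return "unknown"
-- ===== Notes on version B (the rewrite author's own statement) =====
-- stated objective: alternative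
-- what changed: Replaces A's intermediate status list and five separate all/any scans by a single streaming pass that maintains three boolean category flags (healthy/unknown/other) and classifies by a flag decision table at the end, never materialising the statuses.
import Mathlib
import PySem

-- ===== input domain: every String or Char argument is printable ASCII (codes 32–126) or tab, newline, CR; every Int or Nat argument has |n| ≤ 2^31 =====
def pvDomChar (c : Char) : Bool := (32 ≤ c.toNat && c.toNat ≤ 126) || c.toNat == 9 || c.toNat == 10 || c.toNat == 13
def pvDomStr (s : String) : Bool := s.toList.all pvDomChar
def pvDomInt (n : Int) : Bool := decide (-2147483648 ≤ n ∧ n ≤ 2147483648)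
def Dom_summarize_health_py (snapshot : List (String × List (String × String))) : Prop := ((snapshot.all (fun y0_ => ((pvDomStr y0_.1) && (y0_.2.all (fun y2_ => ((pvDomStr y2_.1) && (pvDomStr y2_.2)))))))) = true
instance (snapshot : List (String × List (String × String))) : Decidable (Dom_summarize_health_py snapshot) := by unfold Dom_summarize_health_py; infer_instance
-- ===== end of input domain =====

-- B replaces A's intermediate status list and five all/any scans by one streaming pass
-- keeping three boolean category flags, classified by a decision table at the end.


-- ===== PORT A =====
-- entry.get("status"); none = key absent (Python's None)
def pvStatus (entry : List (String × String)) : Option String :=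
  (PySem.Dict.ofList entry).get? "status"

-- A's list comprehension over snapshot.values(); entry["status"] raises KeyError when the
-- key is absent (the guard then passed, since None != "unconfigured") — Pre_ excludes that,
-- so the .getD "" default is never the claimed value.
def pvConfigured (snapshot : List (String × List (String × String))) : List String :=
  (PySem.Dict.ofList snapshot).values.flatMap (fun entry =>
    if pvStatus entry ≠ some "unconfigured" then [(pvStatus entry).getD ""] else [])

def summarize_health_py (snapshot : List (String × List (String × String))) : String :=
  let configured := pvConfigured snapshot
  if configured.isEmpty then "unconfigured"
  else if configured.all (fun status => status == "healthy") then "healthy"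
  else if configured.all (fun status => status == "unknown") then "unknown"
  else if configured.any (fun status => status == "healthy") then "degraded"
  else if configured.any (fun status => status == "unknown") then "unknown"
  else "down"

-- ===== PORT B =====
-- B's per-element flag update: status falls into exactly one of three categories
def pvUpd (f : Bool × Bool × Bool) (status : String) : Bool × Bool × Bool :=
  if status == "healthy" then (true, f.2.1, f.2.2)
  else if status == "unknown" then (f.1, true, f.2.2)
  else (f.1, f.2.1, true)

-- B's single loop over snapshot.values() with the same guard (same KeyError domain)
def pvFlags (snapshot : List (String × List (String × String))) : Bool × Bool × Bool :=
  (PySem.Dict.ofList snapshot).values.foldl (fun f entry =>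
    if pvStatus entry ≠ some "unconfigured" then pvUpd f ((pvStatus entry).getD "") else f)
    (false, false, false)

def summarize_health_py_alt (snapshot : List (String × List (String × String))) : String :=
  let f := pvFlags snapshot
  if !(f.1 || f.2.1 || f.2.2) then "unconfigured"
  else if f.1 then (if f.2.1 || f.2.2 then "degraded" else "healthy")
  else if f.2.2 then (if f.2.1 then "unknown" else "down")
  else "unknown"

-- ===== PRECONDITION & SPEC =====
-- Pre_ excludes exactly the inputs where the Python A (and B) raises KeyError: some entry
-- dict in the snapshot has no "status" key (its get("status") is None ≠ "unconfigured",
-- so entry["status"] is then evaluated and raises).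
def Pre_summarize_health_py (snapshot : List (String × List (String × String))) : Prop :=
  ∀ entry ∈ (PySem.Dict.ofList snapshot).values, (PySem.Dict.ofList entry).contains "status" = true
instance (snapshot : List (String × List (String × String))) : Decidable (Pre_summarize_health_py snapshot) := by unfold Pre_summarize_health_py; infer_instance

def pvWitness_summarize_health_py : (List (String × List (String × String))) :=
  [("api", [("status", "healthy")]), ("db", [("status", "down")])]

def Spec_summarize_health_py (snapshot : List (String × List (String × String))) (out : String) : Prop := out = summarize_health_py_alt snapshot
instance (snapshot : List (String × List (String × String))) (out : String) : Decidable (Spec_summarize_health_py snapshot out) := by unfold Spec_summarize_health_py; infer_instance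

-- ===== CLAIM (what is proved, stated in full; the proofs are below) =====
def Claim_equal_summarize_health_py : Prop := ∀ (snapshot : List (String × List (String × String))), Dom_summarize_health_py snapshot → Pre_summarize_health_py snapshot → Spec_summarize_health_py snapshot (summarize_health_py snapshot)

-- ===== LEMMAS AND PROOFS =====

-- B's guarded loop over values folds pvUpd over exactly A's comprehension list
theorem pvFlags_eq_foldl_configured (snapshot : List (String × List (String × String))) :
    pvFlags snapshot = (pvConfigured snapshot).foldl pvUpd (false, false, false) := by
  unfold pvFlags pvConfigured
  generalize (PySem.Dict.ofList snapshot).values = l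
  suffices h : ∀ (l : List (List (String × String))) (f : Bool × Bool × Bool),
      l.foldl (fun f entry =>
        if pvStatus entry ≠ some "unconfigured" then pvUpd f ((pvStatus entry).getD "") else f) f
      = List.foldl pvUpd f (l.flatMap (fun entry =>
        if pvStatus entry ≠ some "unconfigured" then [(pvStatus entry).getD ""] else [])) by
    exact h l (false, false, false)
  intro l
  induction l with
  | nil => intro f; rfl
  | cons e t ih =>
    intro f
    simp only [List.foldl_cons, List.flatMap_cons, List.foldl_append]
    by_cases h : pvStatus e ≠ some "unconfigured"
    · rw [if_pos h, if_pos h, List.foldl_cons, List.foldl_nil, ih]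
    · rw [if_neg h, if_neg h, List.foldl_nil, ih]

-- the fold computes the three any-scans of A (with ors of the initial flags)
theorem foldl_pvUpd_any (c : List String) (f : Bool × Bool × Bool) :
    c.foldl pvUpd f
      = (f.1 || c.any (fun s => s == "healthy"),
         f.2.1 || c.any (fun s => s == "unknown"),
         f.2.2 || c.any (fun s => !(s == "healthy") && !(s == "unknown"))) := by
  induction c generalizing f with
  | nil => simp
  | cons x t ih =>
    simp only [List.foldl_cons, List.any_cons, ih]
    unfold pvUpd
    by_cases hx : (x == "healthy") = true
    · have := beq_iff_eq.mp hx; subst this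
      simp
    · by_cases hu : (x == "unknown") = true
      · have := beq_iff_eq.mp hu; subst this
        simp
      · simp [hx, hu]

-- A's if-chain over the list equals B's flag decision table
theorem classify_eq (c : List String) :
    (if c.isEmpty then "unconfigured"
     else if c.all (fun status => status == "healthy") then "healthy"
     else if c.all (fun status => status == "unknown") then "unknown"
     else if c.any (fun status => status == "healthy") then "degraded"
     else if c.any (fun status => status == "unknown") then "unknown"
     else "down")
    =
    (let f := c.foldl pvUpd (false, false, false)
     if !(f.1 || f.2.1 || f.2.2) then "unconfigured"
     else if f.1 then (if f.2.1 || f.2.2 then "degraded" else "healthy")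
     else if f.2.2 then (if f.2.1 then "unknown" else "down")
     else "unknown") := by
  rw [foldl_pvUpd_any]
  by_cases hc : c = []
  · simp [hc]
  · have hne : c.isEmpty = false := by simp [hc]
    obtain ⟨w, hw⟩ := List.exists_mem_of_ne_nil c hc
    -- trichotomy facts
    have hallh : c.all (fun s => s == "healthy")
        = (!c.any (fun s => s == "unknown") && !c.any (fun s => !(s == "healthy") && !(s == "unknown"))) := by
      by_cases h : c.all (fun s => s == "healthy") = true
      · have hall := List.all_eq_true.mp h
        have h1 : c.any (fun s => s == "unknown") = false := by
          apply Bool.eq_false_iff.mpr; intro hcon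
          obtain ⟨x, hx, hxe⟩ := List.any_eq_true.mp hcon
          have := hall x hx
          simp_all
        have h2 : c.any (fun s => !(s == "healthy") && !(s == "unknown")) = false := by
          apply Bool.eq_false_iff.mpr; intro hcon
          obtain ⟨x, hx, hxe⟩ := List.any_eq_true.mp hcon
          have := hall x hx
          simp_all
        simp [h, h1, h2]
      · rw [Bool.eq_false_iff.mpr h]
        symm; apply Bool.eq_false_iff.mpr; intro hcon
        apply h
        obtain ⟨h1, h2⟩ := Bool.and_eq_true_iff.mp hcon
        simp only [Bool.not_eq_eq_eq_not, Bool.not_true, List.any_eq_false] at h1 h2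
        apply List.all_eq_true.mpr
        intro x hx
        have := h2 x hx
        have := h1 x hx
        by_cases hh : (x == "healthy") = true
        · exact hh
        · simp_all
    have hallu : c.all (fun s => s == "unknown")
        = (!c.any (fun s => s == "healthy") && !c.any (fun s => !(s == "healthy") && !(s == "unknown"))) := by
      by_cases h : c.all (fun s => s == "unknown") = true
      · have hall := List.all_eq_true.mp h
        have h1 : c.any (fun s => s == "healthy") = false := by
          apply Bool.eq_false_iff.mpr; intro hcon
          obtain ⟨x, hx, hxe⟩ := List.any_eq_true.mp hcon
          have := hall x hx
          simp_all
        have h2 : c.any (fun s => !(s == "healthy") && !(s == "unknown")) = false := by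
          apply Bool.eq_false_iff.mpr; intro hcon
          obtain ⟨x, hx, hxe⟩ := List.any_eq_true.mp hcon
          have := hall x hx
          simp_all
        simp [h, h1, h2]
      · rw [Bool.eq_false_iff.mpr h]
        symm; apply Bool.eq_false_iff.mpr; intro hcon
        apply h
        obtain ⟨h1, h2⟩ := Bool.and_eq_true_iff.mp hcon
        simp only [Bool.not_eq_eq_eq_not, Bool.not_true, List.any_eq_false] at h1 h2
        apply List.all_eq_true.mpr
        intro x hx
        have := h2 x hx
        have := h1 x hx
        by_cases hu : (x == "unknown") = true
        · exact hu
        · simp_all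
    -- nonempty: some flag is set
    have hsome : (c.any (fun s => s == "healthy") || c.any (fun s => s == "unknown")
        || c.any (fun s => !(s == "healthy") && !(s == "unknown"))) = true := by
      by_cases h1 : (w == "healthy") = true
      · have : c.any (fun s => s == "healthy") = true := List.any_eq_true.mpr ⟨w, hw, h1⟩
        simp [this]
      · by_cases h2 : (w == "unknown") = true
        · have : c.any (fun s => s == "unknown") = true := List.any_eq_true.mpr ⟨w, hw, h2⟩
          simp [this]
        · have : c.any (fun s => !(s == "healthy") && !(s == "unknown")) = true :=
            List.any_eq_true.mpr ⟨w, hw, by simp_all⟩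
          simp [this]
    simp only [hne, Bool.false_eq_true, if_false, hallh, hallu]
    rcases hh : c.any (fun s => s == "healthy") with _ | _ <;>
      rcases hu : c.any (fun s => s == "unknown") with _ | _ <;>
        rcases ho : c.any (fun s => !(s == "healthy") && !(s == "unknown")) with _ | _ <;>
          simp_all

-- ===== VERDICT (by name: the statement is the Claim_ definition above) =====
theorem summarize_health_py_spec : Claim_equal_summarize_health_py := by
  intro snapshot _ _
  unfold Spec_summarize_health_py summarize_health_py summarize_health_py_alt
  rw [pvFlags_eq_foldl_configured]
  exact classify_eq (pvConfigured snapshot)
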